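-- pv_equiv track=rewrite | github.com/htcondor/htmap | htmap/mapper.py | zip_args_and_kwargs
-- ===== SOURCE A (Python) =====
-- from typing import Any, Tuple, Iterable, Dict, Union, Optional, List, Callable, Iterator, Set
-- import itertools
--
-- def zip_args_and_kwargs(args: Iterable[Tuple], kwargs: Iterable[Dict]) -> Iterator[Tuple[Tuple, Dict]]:
--     """
--     Combine iterables of arguments and keyword arguments into
--     an iterable zipped, filled iterator of arguments and keyword arguments.
--
--     Parameters
--     ----------
--     args
--     kwargs
--
--     Returns
--     -------
--
--     """
--     iterators = [iter(args), iter(kwargs)]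
--     fills = {0: (), 1: {}}
--     num_active = 2
--     while True:
--         values = []
--         for i, it in enumerate(iterators):
--             try:
--                 value = next(it)
--             except StopIteration:
--                 num_active -= 1
--                 if num_active == 0:
--                     return
--                 iterators[i] = itertools.repeat(fills[i])
--                 value = fills[i]
--             values.append(value)
--         yield tuple(values)
-- ===== SOURCE B (Python) =====
-- def zip_args_and_kwargs(args, kwargs):
--     """Build-then-index re-implementation: materialize both inputs, pad each
--     to the common length with its own fill (one shared {} instance), then
--     yield by index. Return value matches A for all finite inputs."""
--     la = list(args)
--     lb = list(kwargs)
--     n = max(len(la), len(lb))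
--     shared_dict = {}
--     la = la + [()] * (n - len(la))
--     lb = lb + [shared_dict] * (n - len(lb))
--     for i in range(n):
--         yield (la[i], lb[i])
-- ===== Notes on version B (the rewrite author's own statement) =====
-- stated objective: simpler
-- what changed: Replaced the online active-iterator-count while-loop (StopIteration handling, itertools.repeat fill substitution) with a build-then-index decomposition: materialize both inputs, pad each to the common length with its fill, then yield pairs by index.
import Mathlib
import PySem

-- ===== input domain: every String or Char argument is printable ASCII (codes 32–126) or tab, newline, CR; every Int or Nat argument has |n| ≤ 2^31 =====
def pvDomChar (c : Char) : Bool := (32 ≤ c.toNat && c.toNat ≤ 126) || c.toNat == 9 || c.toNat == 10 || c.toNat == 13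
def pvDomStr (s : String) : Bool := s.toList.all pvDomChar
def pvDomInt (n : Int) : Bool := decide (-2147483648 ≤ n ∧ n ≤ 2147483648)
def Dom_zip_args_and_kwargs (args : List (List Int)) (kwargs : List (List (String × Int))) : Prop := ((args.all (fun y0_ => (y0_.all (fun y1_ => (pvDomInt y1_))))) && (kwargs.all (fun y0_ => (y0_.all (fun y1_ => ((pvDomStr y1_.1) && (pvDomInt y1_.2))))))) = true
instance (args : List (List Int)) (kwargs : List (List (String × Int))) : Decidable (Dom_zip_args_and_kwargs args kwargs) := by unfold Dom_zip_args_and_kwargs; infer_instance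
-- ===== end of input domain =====

-- B: build-then-index decomposition (pad both inputs, then zip by index) instead of A's online active-iterator-count loop; objective: simpler.


def loopA : List (List Int) → List (List (String × Int)) → List (List Int × (List (String × Int)))
  | [], [] => []                                  -- both raise StopIteration: num_active hits 0, return
  | a :: as_, [] => (a, []) :: loopA as_ []        -- kwargs exhausted: its fill {} is used
  | [], b :: bs => ([], b) :: loopA [] bs          -- args exhausted: its fill () is used
  | a :: as_, b :: bs => (a, b) :: loopA as_ bs    -- both yield a value

-- ===== PORT A =====
-- A loops while at least one iterator is active: each step takes the next element
-- from each of the two iterators; an exhausted iterator decrements the active count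
-- (returning when it hits zero) and is replaced by a repeat of its fill (() / {}).
-- The loop state is exactly the pair of remaining-or-exhausted iterators, so the
-- transliteration recurses on the two remaining lists, the "exhausted" state being [].
def zip_args_and_kwargs (args : List (List Int)) (kwargs : List (List (String × Int))) : List (List Int × (List (String × Int))) :=
  loopA args kwargs

-- ===== PORT B =====
-- B materializes, pads each list to the common length with its fill, then indexes.
def zip_args_and_kwargs_alt (args : List (List Int)) (kwargs : List (List (String × Int))) : List (List Int × (List (String × Int))) :=
  let n := max args.length kwargs.length
  let la := args ++ List.replicate (n - args.length) []
  let lb := kwargs ++ List.replicate (n - kwargs.length) []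
  (List.range n).map (fun i => (la.getD i [], lb.getD i []))

-- ===== PRECONDITION & SPEC =====
def Spec_zip_args_and_kwargs (args : List (List Int)) (kwargs : List (List (String × Int))) (out : List (List Int × (List (String × Int)))) : Prop := out = zip_args_and_kwargs_alt args kwargs
instance (args : List (List Int)) (kwargs : List (List (String × Int))) (out : List (List Int × (List (String × Int)))) : Decidable (Spec_zip_args_and_kwargs args kwargs out) := by unfold Spec_zip_args_and_kwargs; infer_instance

-- ===== CLAIM (what is proved, stated in full; the proofs are below) =====
def Claim_equal_zip_args_and_kwargs : Prop := ∀ (args : List (List Int)) (kwargs : List (List (String × Int))), Dom_zip_args_and_kwargs args kwargs → Spec_zip_args_and_kwargs args kwargs (zip_args_and_kwargs args kwargs)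

-- ===== LEMMAS AND PROOFS =====
lemma pad_getD {T : Type} (d : T) (xs : List T) (k i : Nat) :
    (xs ++ List.replicate k d).getD i d = xs.getD i d := by
  induction xs generalizing i with
  | nil =>
    cases h : decide (i < k) with
    | true => simp_all [List.getD]
    | false => simp_all [List.getD]
  | cons a l ih =>
    cases i with
    | zero => rfl
    | succ j => simpa using ih j

-- evaluation of B's port: the padding disappears under getD with the same default
lemma alt_eq_spec (args : List (List Int)) (kwargs : List (List (String × Int))) :
    zip_args_and_kwargs_alt args kwargs
      = (List.range (max args.length kwargs.length)).map
          (fun i => (args.getD i [], kwargs.getD i [])) := by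
  simp only [zip_args_and_kwargs_alt, pad_getD]

lemma loopA_eq_alt : ∀ (args : List (List Int)) (kwargs : List (List (String × Int))),
    loopA args kwargs = zip_args_and_kwargs_alt args kwargs
  | [], [] => by rw [alt_eq_spec, loopA]; rfl
  | a :: as_, [] => by
    rw [alt_eq_spec, loopA, loopA_eq_alt as_ [], alt_eq_spec]
    simp [List.range_succ_eq_map, Function.comp_def]
  | [], b :: bs => by
    rw [alt_eq_spec, loopA, loopA_eq_alt [] bs, alt_eq_spec]
    simp [List.range_succ_eq_map, Function.comp_def]
  | a :: as_, b :: bs => by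
    rw [alt_eq_spec, loopA, loopA_eq_alt as_ bs, alt_eq_spec]
    simp [List.range_succ_eq_map, Nat.succ_max_succ, Function.comp_def]

-- ===== VERDICT (by name: the statement is the Claim_ definition above) =====
theorem zip_args_and_kwargs_spec : Claim_equal_zip_args_and_kwargs := by
  intro args kwargs _
  unfold Spec_zip_args_and_kwargs zip_args_and_kwargs
  exact loopA_eq_alt args kwargs
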